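-- pv_equiv track=rewrite | github.com/alexandrazuch/CS670_Final | lyrics_by_playlist.py | rid_feature
-- ===== SOURCE A (Python) =====
-- def rid_feature(song):
--     song_wo_feature = song
--     if '(' in song:
--         song_wo_feature = ''
--         for i in song:
--             if i == '(':
--                 break
--             song_wo_feature += i
--     return song_wo_feature.replace('?','').replace('!','').replace('\'','').replace(',','')
-- ===== SOURCE B (Python) =====
-- def rid_feature(song):
--     out = []
--     for ch in song:
--         if ch == '(':
--             break
--         if ch not in "?!',":
--             out.append(ch)
--     return ''.join(out)
-- ===== Notes on version B (the rewrite author's own statement) =====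
-- stated objective: simpler
-- what changed: Replaces A's two-phase approach (a truncation loop guarded by a substring test, then four chained .replace passes) with a single character scan that breaks at the first opening parenthesis and filters the four punctuation characters in the same pass.
import Mathlib
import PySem

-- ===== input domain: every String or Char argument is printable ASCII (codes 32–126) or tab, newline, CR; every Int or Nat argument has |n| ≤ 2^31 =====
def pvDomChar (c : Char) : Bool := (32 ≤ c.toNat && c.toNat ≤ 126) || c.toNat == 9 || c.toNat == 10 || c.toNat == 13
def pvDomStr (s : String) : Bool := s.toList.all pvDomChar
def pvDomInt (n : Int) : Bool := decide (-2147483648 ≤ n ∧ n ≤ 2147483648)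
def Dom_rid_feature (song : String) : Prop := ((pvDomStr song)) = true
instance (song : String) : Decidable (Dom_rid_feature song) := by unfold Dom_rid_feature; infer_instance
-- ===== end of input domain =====

-- B fuses A's truncation loop and four chained .replace passes into one filtering scan (simpler decomposition, same result).

-- ===== PORT A =====
-- the 'for i in song: if i == '(': break; song_wo_feature += i' loop
def ridA_for (acc : List Char) : List Char → List Char
  | [] => acc
  | i :: rest => if i = '(' then acc else ridA_for (acc ++ [i]) rest

def rid_feature (song : String) : String :=
  let song_wo_feature :=
    if PySem.Str.isIn "(" song then String.ofList (ridA_for [] song.toList) else song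
  PySem.Str.replace (PySem.Str.replace (PySem.Str.replace
    (PySem.Str.replace song_wo_feature "?" "") "!" "") "'" "") "," ""

-- ===== PORT B =====
-- single pass: break on '(', filter the four punctuation chars, join
def ridB_go : List Char → List Char
  | [] => []
  | ch :: rest =>
    if ch = '(' then []
    else if ch ∈ ['?', '!', '\'', ','] then ridB_go rest
    else ch :: ridB_go rest

def rid_feature_alt (song : String) : String := String.ofList (ridB_go song.toList)

-- ===== PRECONDITION & SPEC =====
def Spec_rid_feature (song : String) (out : String) : Prop := out = rid_feature_alt song
instance (song : String) (out : String) : Decidable (Spec_rid_feature song out) := by unfold Spec_rid_feature; infer_instance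

-- ===== CLAIM (what is proved, stated in full; the proofs are below) =====
def Claim_equal_rid_feature : Prop := ∀ (song : String), Dom_rid_feature song → Spec_rid_feature song (rid_feature song)

-- ===== LEMMAS AND PROOFS =====

lemma replace_go_single (c : Char) : ∀ (fuel : Nat) (l acc : List Char), l.length ≤ fuel →
    PySem.Chars.replace.go [c] [] fuel l acc = acc.reverse ++ l.filter (· ≠ c) := by
  intro fuel
  induction fuel with
  | zero => intro l acc h; cases l with
    | nil => simp [PySem.Chars.replace.go]
    | cons x t => simp at h
  | succ n ih =>
    intro l acc h
    cases l with
    | nil => simp [PySem.Chars.replace.go]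
    | cons x t =>
      by_cases hx : x = c
      · subst hx
        rw [show PySem.Chars.replace.go [x] [] (n + 1) (x :: t) acc
              = PySem.Chars.replace.go [x] [] n t acc from by
            simp [PySem.Chars.replace.go, List.isPrefixOf]]
        rw [ih t acc (by simpa using h)]
        simp
      · rw [show PySem.Chars.replace.go [c] [] (n + 1) (x :: t) acc
              = PySem.Chars.replace.go [c] [] n t (x :: acc) from by
            simp [PySem.Chars.replace.go, List.isPrefixOf, Ne.symm hx]]
        rw [ih t (x :: acc) (by simpa using h)]
        simp [hx]

lemma replace_single (cs : List Char) (c : Char) :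
    PySem.Chars.replace cs [c] [] = cs.filter (· ≠ c) := by
  simp only [PySem.Chars.replace, List.isEmpty_cons, Bool.false_eq_true, if_false]
  exact replace_go_single c cs.length cs [] le_rfl

lemma ridA_for_eq : ∀ (l acc : List Char), ridA_for acc l = acc ++ l.takeWhile (· ≠ '(') := by
  intro l
  induction l with
  | nil => intro acc; simp [ridA_for]
  | cons x t ih =>
    intro acc
    by_cases hx : x = '('
    · subst hx; simp [ridA_for, List.takeWhile]
    · simp [ridA_for, hx, List.takeWhile, ih]

lemma takeWhile_of_not_mem (l : List Char) (h : '(' ∉ l) :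
    l.takeWhile (· ≠ '(') = l := by
  induction l with
  | nil => rfl
  | cons x t ih =>
    simp only [List.mem_cons, not_or] at h
    rw [List.takeWhile_cons, if_pos (by simp [Ne.symm h.1]), ih h.2]

lemma ridB_eq (l : List Char) :
    ridB_go l = ((((l.takeWhile (· ≠ '(')).filter (· ≠ '?')).filter (· ≠ '!')).filter
      (· ≠ '\'')).filter (· ≠ ',') := by
  induction l with
  | nil => rfl
  | cons x t ih =>
    by_cases hx : x = '('
    · subst hx; simp [ridB_go, List.takeWhile]
    · by_cases hm : x ∈ ['?', '!', '\'', ',']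
      · simp only [List.mem_cons, List.not_mem_nil, or_false] at hm
        rcases hm with h | h | h | h <;>
          · subst h; simp [ridB_go, hx, List.takeWhile, ih]
      · simp only [List.mem_cons, List.not_mem_nil, or_false, not_or] at hm
        obtain ⟨h1, h2, h3, h4⟩ := hm
        simp [ridB_go, hx, List.takeWhile, ih, h1, h2, h3, h4]

lemma singleton_infix_iff (c : Char) (l : List Char) : [c] <:+: l ↔ c ∈ l := by
  constructor
  · intro h; exact h.mem (by simp)
  · intro h
    obtain ⟨s, t, rfl⟩ := List.append_of_mem h
    exact ⟨s, t, by simp⟩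

-- ===== VERDICT (by name: the statement is the Claim_ definition above) =====
theorem rid_feature_spec : Claim_equal_rid_feature := by
  intro song _
  unfold Spec_rid_feature rid_feature rid_feature_alt
  have hswf :
      (if PySem.Str.isIn "(" song then String.ofList (ridA_for [] song.toList) else song).toList
        = song.toList.takeWhile (· ≠ '(') := by
    by_cases h : PySem.Str.isIn "(" song = true
    · rw [if_pos h]
      simp [ridA_for_eq]
    · rw [if_neg h]
      have h' : '(' ∉ song.toList := by
        intro hm
        exact h ((PySem.Str.isIn_iff_infix _ _).mpr (by simpa [singleton_infix_iff] using hm))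
      exact (takeWhile_of_not_mem _ h').symm
  simp only [PySem.Str.replace]
  refine congrArg String.ofList ?_
  rw [ridB_eq]
  have e1 : ("?" : String).toList = ['?'] := rfl
  have e2 : ("!" : String).toList = ['!'] := rfl
  have e3 : ("'" : String).toList = ['\''] := rfl
  have e4 : ("," : String).toList = [','] := rfl
  have e0 : ("" : String).toList = [] := rfl
  simp only [e1, e2, e3, e4, e0, String.toList_ofList, replace_single, hswf]
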